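-- pv_equiv track=rewrite | github.com/sengutengu/bioinformatics | rosalind/string-algorithms/GRPH.py | find_adjacency_list_faster
-- ===== SOURCE A (Python) =====
-- def find_adjacency_list_faster(ss_dict, k):
--     """
--     O(n*m) time implementation of solution
--     """
--     # Create a hash table
--     suffix_to_keys = {}
--     for key, value in ss_dict.items():
--         suffix = value[-k:]
--         if suffix not in suffix_to_keys:
--             suffix_to_keys[suffix] = []
--         suffix_to_keys[suffix].append(key)
--
--     adjacency_list = []
--     # n = len(ss_dict)
--     for key, value in ss_dict.items():
--         prefix = value[:k]
--         if prefix in suffix_to_keys: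
--             # m = 4^k = at most 64 with k=3
--             for candidate in suffix_to_keys[prefix]:
--                 if candidate != key:
--                     adjacency_list.append(f"{candidate} {key}")
--     return adjacency_list
-- ===== SOURCE B (Python) =====
-- def find_adjacency_list_faster(ss_dict, k):
--     """Direct nested scan: no suffix index, just compare every pair."""
--     adjacency_list = []
--     for key, value in ss_dict.items():
--         prefix = value[:k]
--         for candidate, cval in ss_dict.items():
--             if candidate != key and cval[-k:] == prefix:
--                 adjacency_list.append(f"{candidate} {key}")
--     return adjacency_list
-- ===== Notes on version B (the rewrite author's own statement) =====
-- stated objective: simpler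
-- what changed: Drops the suffix_to_keys hash index entirely and replaces it with a direct nested scan over the dict, comparing each value's k-suffix against each key's k-prefix on the fly.
import Mathlib
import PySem

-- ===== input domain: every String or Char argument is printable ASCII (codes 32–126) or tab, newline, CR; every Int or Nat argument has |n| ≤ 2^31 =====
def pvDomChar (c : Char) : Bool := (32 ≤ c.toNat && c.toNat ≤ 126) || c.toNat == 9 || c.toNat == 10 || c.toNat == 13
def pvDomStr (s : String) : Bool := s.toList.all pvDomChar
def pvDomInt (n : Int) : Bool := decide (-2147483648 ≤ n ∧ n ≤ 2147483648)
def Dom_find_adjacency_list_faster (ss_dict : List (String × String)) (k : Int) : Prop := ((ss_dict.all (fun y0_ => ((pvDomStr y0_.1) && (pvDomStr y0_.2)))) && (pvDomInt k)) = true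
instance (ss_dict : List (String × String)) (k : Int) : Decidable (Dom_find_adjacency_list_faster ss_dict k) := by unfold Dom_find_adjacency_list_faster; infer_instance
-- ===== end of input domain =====

-- B drops A's suffix_to_keys hash index and uses a direct nested scan (simpler; not faster).

-- ===== PORT A =====
-- 'if suffix not in d: d[suffix] = []; d[suffix].append(key)'  ≡  d.modify suffix [] (· ++ [key])
def find_adjacency_list_faster (ss_dict : List (String × String)) (k : Int) : List String :=
  let suffix_to_keys : PySem.Dict String (List String) :=
    ss_dict.foldl (fun d kv =>
      d.modify (PySem.Str.slice kv.2 (some (-k)) none) [] (· ++ [kv.1])) PySem.Dict.empty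
  ss_dict.foldl (fun acc kv =>
    let pfx := PySem.Str.slice kv.2 none (some k)
    if suffix_to_keys.contains pfx then
      (suffix_to_keys.getD pfx []).foldl (fun acc candidate =>
        if candidate ≠ kv.1 then acc ++ [candidate ++ " " ++ kv.1] else acc) acc
    else acc) []

-- ===== PORT B =====
def find_adjacency_list_faster_alt (ss_dict : List (String × String)) (k : Int) : List String :=
  ss_dict.foldl (fun acc kv =>
    let pfx := PySem.Str.slice kv.2 none (some k)
    ss_dict.foldl (fun acc cc =>
      if cc.1 ≠ kv.1 ∧ PySem.Str.slice cc.2 (some (-k)) none = pfx then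
        acc ++ [cc.1 ++ " " ++ kv.1]
      else acc) acc) []

-- ===== PRECONDITION & SPEC =====
def Spec_find_adjacency_list_faster (ss_dict : List (String × String)) (k : Int) (out : List String) : Prop := out = find_adjacency_list_faster_alt ss_dict k
instance (ss_dict : List (String × String)) (k : Int) (out : List String) : Decidable (Spec_find_adjacency_list_faster ss_dict k out) := by unfold Spec_find_adjacency_list_faster; infer_instance

-- ===== CLAIM (what is proved, stated in full; the proofs are below) =====
def Claim_equal_find_adjacency_list_faster : Prop := ∀ (ss_dict : List (String × String)) (k : Int), Dom_find_adjacency_list_faster ss_dict k → Spec_find_adjacency_list_faster ss_dict k (find_adjacency_list_faster ss_dict k)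

-- ===== LEMMAS AND PROOFS =====

-- The index grouped under p holds exactly the keys whose value has k-suffix p, in dict order.
theorem pv_index_getD (ss : List (String × String)) (k : Int) (p : String) :
    (ss.foldl (fun d kv =>
      d.modify (PySem.Str.slice kv.2 (some (-k)) none) [] (· ++ [kv.1])) PySem.Dict.empty).getD p []
    = ((ss.filter (fun kv => PySem.Str.slice kv.2 (some (-k)) none == p)).map Prod.fst) := by
  have h := PySem.Dict.getD_foldl_modify_append
    (l := ss.map (fun kv => (PySem.Str.slice kv.2 (some (-k)) none, kv.1)))
    (d := (PySem.Dict.empty : PySem.Dict String (List String))) (c := p)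
  rw [List.foldl_map] at h
  simpa [List.filter_map, List.map_map, Function.comp_def, PySem.Dict.getD_empty] using h

-- A's inner loop over a plain list of candidates.
theorem pv_inner_A (key : String) (l : List String) (acc : List String) :
    l.foldl (fun acc candidate =>
      if candidate ≠ key then acc ++ [candidate ++ " " ++ key] else acc) acc
    = acc ++ (l.filter (fun c => c ≠ key)).map (fun c => c ++ " " ++ key) := by
  induction l generalizing acc with
  | nil => simp
  | cons c t ih =>
    simp only [List.foldl_cons, List.filter_cons]
    by_cases h : c = key
    · rw [if_neg (fun hn => hn h), ih]; simp [h]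
    · rw [if_pos h, ih]; simp [h]

-- B's inner loop over the whole association list.
theorem pv_inner_B (key p : String) (k : Int) (ss : List (String × String)) (acc : List String) :
    ss.foldl (fun acc cc =>
      if cc.1 ≠ key ∧ PySem.Str.slice cc.2 (some (-k)) none = p then
        acc ++ [cc.1 ++ " " ++ key]
      else acc) acc
    = acc ++ (ss.filter (fun cc => cc.1 ≠ key ∧ PySem.Str.slice cc.2 (some (-k)) none = p)).map
        (fun cc => cc.1 ++ " " ++ key) := by
  induction ss generalizing acc with
  | nil => simp
  | cons c t ih =>
    simp only [List.foldl_cons, List.filter_cons]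
    by_cases h : c.1 ≠ key ∧ PySem.Str.slice c.2 (some (-k)) none = p
    · rw [if_pos h, ih]; simp [h]
    · rw [if_neg h, ih]; simp [h]

-- the two inner results coincide
theorem pv_contrib_eq (key p : String) (k : Int) (ss : List (String × String)) :
    List.map (fun c => c ++ " " ++ key)
      (List.filter (fun c => c ≠ key)
        ((ss.filter (fun kv => PySem.Str.slice kv.2 (some (-k)) none == p)).map Prod.fst))
    = (ss.filter (fun cc => cc.1 ≠ key ∧ PySem.Str.slice cc.2 (some (-k)) none = p)).map
        (fun cc => cc.1 ++ " " ++ key) := by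
  rw [List.filter_map, List.map_map, List.filter_filter]
  apply congrArg
  apply List.filter_congr
  intro x _
  simp [Function.comp, Bool.beq_eq_decide_eq]

theorem find_adjacency_list_faster_eq_alt (ss : List (String × String)) (k : Int) :
    find_adjacency_list_faster ss k = find_adjacency_list_faster_alt ss k := by
  unfold find_adjacency_list_faster find_adjacency_list_faster_alt
  apply PySem.List.foldl_congr_mem
  intro acc kv _
  set p := PySem.Str.slice kv.2 none (some k) with hp
  by_cases hc : (ss.foldl (fun d kv =>
      d.modify (PySem.Str.slice kv.2 (some (-k)) none) [] (· ++ [kv.1]))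
      PySem.Dict.empty).contains p = true
  · simp only [hc, if_pos]
    rw [pv_inner_A, pv_index_getD, pv_inner_B, pv_contrib_eq]
  · simp only [Bool.not_eq_true] at hc
    simp only [hc, Bool.false_eq_true, if_false]
    rw [pv_inner_B]
    have hd : (ss.foldl (fun d kv =>
        d.modify (PySem.Str.slice kv.2 (some (-k)) none) [] (· ++ [kv.1]))
        PySem.Dict.empty).getD p [] = ([] : List String) :=
      PySem.Dict.getD_of_not_contains _ _ hc
    have := pv_index_getD ss k p
    rw [hd] at this
    rw [← pv_contrib_eq kv.1 p k ss, ← this]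
    simp

-- ===== VERDICT (by name: the statement is the Claim_ definition above) =====
theorem find_adjacency_list_faster_spec : Claim_equal_find_adjacency_list_faster := by
  intro ss k _
  unfold Spec_find_adjacency_list_faster
  exact find_adjacency_list_faster_eq_alt ss k
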